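-- pv_equiv track=rewrite | github.com/ma-lacroix/adventofcode | 2025/aoc2025_07.py | solve
-- ===== SOURCE A (Python) =====
-- def solve(paths: dict, current_node: str, cache: dict = None) -> int:
--     # can't use the @cache decorator
--     if cache is None:
--         cache = {}
--     if current_node in cache:
--         return cache[current_node]
--
--     if 0 == len(paths[current_node]):
--         return 1  # Reached leaf!!!
--     total_paths = 0
--     for path in paths[current_node]:
--         total_paths += solve(paths, path, cache)
--     cache[current_node] = total_paths
--     return total_paths
-- ===== SOURCE B (Python) =====
-- def solve(paths: dict, current_node: str, cache: dict = None) -> int: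
--     # Bottom-up fixed-point DP instead of recursion: repeatedly sweep the node
--     # table, caching every non-leaf node whose children are all resolved
--     # (cached, or a leaf present in the table), until a sweep changes nothing.
--     if cache is None:
--         cache = {}
--     changed = True
--     while changed:
--         changed = False
--         for node, children in paths.items():
--             if node in cache or not children:
--                 continue
--             if all(ch in cache or paths.get(ch) == [] for ch in children):
--                 cache[node] = sum(cache[ch] if ch in cache else 1 for ch in children)
--                 changed = True
--     if current_node in cache:
--         return cache[current_node]
--     if not paths[current_node]:
--         return 1  # uncached leaf
--     return cache[current_node]  # unreachable on complete acyclic input (KeyError on a cycle)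
-- ===== Notes on version B (the rewrite author's own statement) =====
-- stated objective: alternative
-- what changed: Replaces A's recursive memoized depth-first traversal by an iterative bottom-up fixed-point dynamic program: repeatedly sweep the node table caching every non-leaf node whose children are all resolved, until a sweep changes nothing, then read off the start node; return value is identical, but B fills the cache bottom-up so the set/order of keys it stores into the passed-in cache differs from A's traversal.
import Mathlib
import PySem

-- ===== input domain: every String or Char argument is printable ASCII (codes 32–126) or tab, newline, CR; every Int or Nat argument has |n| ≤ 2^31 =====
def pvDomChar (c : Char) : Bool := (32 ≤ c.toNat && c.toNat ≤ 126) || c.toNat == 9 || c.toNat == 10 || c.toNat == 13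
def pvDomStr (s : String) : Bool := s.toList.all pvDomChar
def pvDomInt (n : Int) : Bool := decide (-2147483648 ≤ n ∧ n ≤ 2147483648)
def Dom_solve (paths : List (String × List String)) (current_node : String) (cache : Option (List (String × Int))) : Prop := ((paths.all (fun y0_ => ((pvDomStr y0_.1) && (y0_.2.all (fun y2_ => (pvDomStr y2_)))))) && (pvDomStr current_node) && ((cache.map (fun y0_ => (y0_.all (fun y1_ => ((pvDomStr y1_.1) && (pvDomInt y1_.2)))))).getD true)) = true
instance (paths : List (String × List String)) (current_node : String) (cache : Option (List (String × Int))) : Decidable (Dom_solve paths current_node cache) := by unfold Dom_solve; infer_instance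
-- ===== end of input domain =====

-- B replaces A's recursive memoized DFS by a bottom-up fixed-point sweep (alternative
-- decomposition). A mutates the passed-in cache; equivalence here is about the RETURN
-- value only (B fills the cache bottom-up and may store other keys than A's traversal).

-- ===== PORT A =====
-- A's recursion; the `for path in paths[current_node]` loop is the standard list recursion
-- over the same state (running total, cache).  The fuel argument only makes the possibly
-- non-terminating recursion total; `runA_ok` below proves the fuel used in `solve` exceeds
-- the recursion's depth on every input satisfying Pre_solve (where Python A returns).
def runA (P : PySem.Dict String (List String)) : Nat → List String → Int → PySem.Dict String Int → Option (Int × PySem.Dict String Int)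
  | _, [], t, c => some (t, c)
  | 0, _ :: _, _, _ => none
  | f+1, n :: rest, t, c =>
    if c.contains n then
      runA P f rest (t + (c.get? n).getD 0) c                     -- `if current_node in cache: return cache[current_node]`
    else
      match P.get? n with
      | none => none                                              -- paths[current_node] raises KeyError
      | some ch =>
        if ch.isEmpty then runA P f rest (t + 1) c                -- `if 0 == len(...): return 1`
        else
          match runA P f ch 0 c with                              -- `total_paths = 0; for path in ...: total_paths += solve(...)`
          | none => none
          | some (s, c') => runA P f rest (t + s) (c'.insert n s) -- `cache[current_node] = total_paths; return total_paths`

def sumLenA (l : List (String × List String)) : Nat := l.foldr (fun kv a => kv.2.length + a) 0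

def solve (paths : List (String × List String)) (current_node : String) (cache : Option (List (String × Int))) : Int :=
  let P := PySem.Dict.ofList paths
  let c0 : PySem.Dict String Int := PySem.Dict.ofList (cache.getD [])   -- `if cache is None: cache = {}`
  match runA P ((sumLenA P.items + 2) ^ (P.size + 4)) [current_node] 0 c0 with
  | some (t, _) => t
  | none => 0       -- unreachable under Pre_solve (Python A raises on these inputs)

-- ===== PORT B =====
-- `ch in cache or paths.get(ch) == []`
def resolvedB (P : PySem.Dict String (List String)) (c : PySem.Dict String Int) (m : String) : Bool :=
  c.contains m || P.get? m == some []

-- one `for node, children in paths.items():` sweep, threading (cache, changed)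
def sweepB (P : PySem.Dict String (List String)) : List (String × List String) → PySem.Dict String Int → Bool → PySem.Dict String Int × Bool
  | [], c, ch => (c, ch)
  | (n, vs) :: rest, c, ch =>
    if c.contains n || vs.isEmpty then sweepB P rest c ch
    else if vs.all (resolvedB P c) then
      sweepB P rest (c.insert n ((vs.map (fun m => if c.contains m then (c.get? m).getD 0 else 1)).sum)) true
    else sweepB P rest c ch

-- `while changed:` — fuel only makes the loop total; `runB_ok` below proves P.size + 2
-- rounds always reach an unchanged sweep (each changed sweep caches a fresh key of P).
def runB (P : PySem.Dict String (List String)) : Nat → PySem.Dict String Int → Option (PySem.Dict String Int)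
  | 0, _ => none
  | f+1, c =>
    match sweepB P P.items c false with
    | (c', true) => runB P f c'
    | (c', false) => some c'

def solve_alt (paths : List (String × List String)) (current_node : String) (cache : Option (List (String × Int))) : Int :=
  let P := PySem.Dict.ofList paths
  let c0 : PySem.Dict String Int := PySem.Dict.ofList (cache.getD [])
  match runB P (P.size + 2) c0 with
  | none => 0       -- unreachable: the sweep loop always terminates within P.size + 2 rounds
  | some c =>
    if c.contains current_node then (c.get? current_node).getD 0
    else
      match P.get? current_node with
      | some [] => 1                   -- `if not paths[current_node]: return 1`
      | _ => 0                         -- Python B raises KeyError here; outside Pre_solve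

-- ===== PRECONDITION & SPEC =====
-- Pre_solve = exactly the inputs on which Python A returns (elsewhere it raises KeyError or
-- RecursionError): the dependency graph explored from current_node, cut at cached nodes, is
-- complete (every needed node is a key of paths) and acyclic.  Stated as the standard bounded
-- monotone closure of the graph: `goodAt i n` = n is cached, or a key all of whose children
-- are good at depth i-1; depth P.size + 3 suffices because each closure level adds a distinct key.
def goodAt (P : PySem.Dict String (List String)) (c0 : PySem.Dict String Int) : Nat → String → Bool
  | 0, _ => false
  | i+1, n =>
    c0.contains n ||
      match P.get? n with
      | none => false
      | some ch => ch.all (goodAt P c0 i)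

def Pre_solve (paths : List (String × List String)) (current_node : String) (cache : Option (List (String × Int))) : Prop :=
  goodAt (PySem.Dict.ofList paths) (PySem.Dict.ofList (cache.getD []))
    ((PySem.Dict.ofList paths : PySem.Dict String (List String)).size + 3) current_node = true

instance (paths : List (String × List String)) (current_node : String) (cache : Option (List (String × Int))) : Decidable (Pre_solve paths current_node cache) := by unfold Pre_solve; infer_instance

def pvWitness_solve : (List (String × List String)) × String × (Option (List (String × Int))) :=
  ([("a", ["b", "b"]), ("b", [])], "a", none)

def Spec_solve (paths : List (String × List String)) (current_node : String) (cache : Option (List (String × Int))) (out : Int) : Prop := out = solve_alt paths current_node cache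
instance (paths : List (String × List String)) (current_node : String) (cache : Option (List (String × Int))) (out : Int) : Decidable (Spec_solve paths current_node cache out) := by unfold Spec_solve; infer_instance

-- ===== CLAIM (what is proved, stated in full; the proofs are below) =====
def Claim_equal_solve : Prop := ∀ (paths : List (String × List String)) (current_node : String) (cache : Option (List (String × Int))), Dom_solve paths current_node cache → Pre_solve paths current_node cache → Spec_solve paths current_node cache (solve paths current_node cache)

-- ===== LEMMAS AND PROOFS =====

-- the common reference value: what A returns for a good node (reads the ORIGINAL cache c0)
def valAt (P : PySem.Dict String (List String)) (c0 : PySem.Dict String Int) : Nat → String → Int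
  | 0, _ => 0
  | i+1, n =>
    if c0.contains n then (c0.get? n).getD 0
    else
      match P.get? n with
      | none => 0
      | some ch => if ch.isEmpty then 1 else (ch.map (valAt P c0 i)).sum

-- cache invariant: c agrees with c0 on c0's keys, and every other entry is a good node
-- (at closure depth j) holding its reference value
def Invb (P : PySem.Dict String (List String)) (c0 : PySem.Dict String Int) (N j : Nat) (c : PySem.Dict String Int) : Prop :=
  (∀ k, c0.contains k = true → c.get? k = c0.get? k) ∧
  (∀ k, c0.contains k = false → c.get? k = none ∨ (goodAt P c0 j k = true ∧ c.get? k = some (valAt P c0 N k)))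

def cntU (P : PySem.Dict String (List String)) (c : PySem.Dict String Int) : Nat :=
  (PySem.Dict.keys P).countP (fun k => !c.contains k)

theorem goodAt_mono (P : PySem.Dict String (List String)) (c0 : PySem.Dict String Int) :
    ∀ i j n, goodAt P c0 i n = true → i ≤ j → goodAt P c0 j n = true := by
  intro i
  induction i with
  | zero => intro j n h _; simp [goodAt] at h
  | succ i ih =>
    intro j n h hij
    obtain ⟨j', rfl⟩ : ∃ j', j = j' + 1 := ⟨j - 1, by omega⟩
    simp only [goodAt] at h ⊢
    rcases Bool.or_eq_true_iff.mp h with hc | hm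
    · exact Bool.or_eq_true_iff.mpr (Or.inl hc)
    · refine Bool.or_eq_true_iff.mpr (Or.inr ?_)
      cases hP : P.get? n with
      | none => rw [hP] at hm; simp at hm
      | some ch =>
        rw [hP] at hm
        simp only [List.all_eq_true] at hm ⊢
        exact fun m hmem => ih j' m (hm m hmem) (by omega)


theorem valAt_cached (P : PySem.Dict String (List String)) (c0 : PySem.Dict String Int) (i : Nat)
    (n : String) (hc0 : c0.contains n = true) : valAt P c0 (i+1) n = (c0.get? n).getD 0 := by
  simp [valAt, hc0]

theorem valAt_leaf (P : PySem.Dict String (List String)) (c0 : PySem.Dict String Int) (i : Nat)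
    (n : String) (ch : List String) (hc0 : c0.contains n = false) (hP : P.get? n = some ch)
    (he : ch.isEmpty = true) : valAt P c0 (i+1) n = 1 := by
  simp [valAt, hc0, hP, he]

theorem valAt_internal (P : PySem.Dict String (List String)) (c0 : PySem.Dict String Int) (i : Nat)
    (n : String) (ch : List String) (hc0 : c0.contains n = false) (hP : P.get? n = some ch)
    (he : ch.isEmpty = false) : valAt P c0 (i+1) n = (ch.map (valAt P c0 i)).sum := by
  simp [valAt, hc0, hP, he]

theorem valAt_stable (P : PySem.Dict String (List String)) (c0 : PySem.Dict String Int) :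
    ∀ i j n, goodAt P c0 i n = true → i ≤ j → valAt P c0 j n = valAt P c0 i n := by
  intro i
  induction i with
  | zero => intro j n h _; simp [goodAt] at h
  | succ i ih =>
    intro j n h hij
    obtain ⟨j', rfl⟩ : ∃ j', j = j' + 1 := ⟨j - 1, by omega⟩
    simp only [goodAt] at h
    by_cases hc : c0.contains n = true
    · rw [valAt_cached P c0 j' n hc, valAt_cached P c0 i n hc]
    · simp only [Bool.not_eq_true] at hc
      rw [hc] at h; simp only [Bool.false_or] at h
      cases hP : P.get? n with
      | none => exfalso; rw [hP] at h; simp at h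
      | some ch =>
        rw [hP] at h
        simp only [List.all_eq_true] at h
        cases he : ch.isEmpty with
        | true => rw [valAt_leaf P c0 j' n ch hc hP he, valAt_leaf P c0 i n ch hc hP he]
        | false =>
          rw [valAt_internal P c0 j' n ch hc hP he, valAt_internal P c0 i n ch hc hP he]
          congr 1
          exact List.map_congr_left fun m hm => ih j' m (h m hm) (by omega)

theorem Invb_mono (P : PySem.Dict String (List String)) (c0 : PySem.Dict String Int) (N j j' : Nat)
    (c : PySem.Dict String Int) (h : Invb P c0 N j c) (hj : j ≤ j') : Invb P c0 N j' c := by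
  refine ⟨h.1, fun k hk => ?_⟩
  rcases h.2 k hk with h0 | ⟨hg, hv⟩
  · exact Or.inl h0
  · exact Or.inr ⟨goodAt_mono P c0 j j' k hg hj, hv⟩

theorem Invb_trans_contains (P : PySem.Dict String (List String)) (c0 : PySem.Dict String Int) (N j : Nat)
    (c : PySem.Dict String Int) (h : Invb P c0 N j c) (k : String) (hk : c0.contains k = true) :
    c.contains k = true := by
  rw [PySem.Dict.contains_eq_isSome_get?, h.1 k hk, ← PySem.Dict.contains_eq_isSome_get?]
  exact hk

-- cache hit returns the reference value
theorem Invb_hit_val (P : PySem.Dict String (List String)) (c0 : PySem.Dict String Int) (N' j : Nat)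
    (c : PySem.Dict String Int) (h : Invb P c0 (N'+1) j c) (n : String) (hn : c.contains n = true) :
    (c.get? n).getD 0 = valAt P c0 (N'+1) n := by
  by_cases hc : c0.contains n = true
  · rw [h.1 n hc, valAt_cached P c0 N' n hc]
  · simp only [Bool.not_eq_true] at hc
    rcases h.2 n hc with h0 | ⟨_, hv⟩
    · rw [PySem.Dict.contains_eq_isSome_get?, h0] at hn; simp at hn
    · simp [hv]

theorem sumLenA_bound : ∀ (l : List (String × List String)) (p : String × List String),
    p ∈ l → p.2.length ≤ sumLenA l := by
  intro l
  induction l with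
  | nil => intro p h; simp at h
  | cons q rest ih =>
    intro p h
    simp only [sumLenA, List.foldr_cons] at *
    rcases List.mem_cons.mp h with rfl | h
    · omega
    · have := ih p h; omega

-- ===== A-side main lemma =====
theorem runA_ok (P : PySem.Dict String (List String)) (c0 : PySem.Dict String Int) (N L : Nat)
    (hL : ∀ n ch, P.get? n = some ch → ch.length ≤ L) :
    ∀ f (l : List String) (i : Nat) (t : Int) (c : PySem.Dict String Int),
      i ≤ N →
      (∀ n ∈ l, goodAt P c0 i n = true) →
      Invb P c0 N N c →
      l.length * (L+2) ^ (i+1) ≤ f →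
      ∃ c', runA P f l t c = some (t + (l.map (valAt P c0 N)).sum, c') ∧ Invb P c0 N N c' := by
  intro f
  induction f with
  | zero =>
    intro l i t c _ _ hInv hfuel
    cases l with
    | nil => exact ⟨c, by simp [runA], hInv⟩
    | cons n rest =>
      exfalso
      have hpow : 1 ≤ (L+2) ^ (i+1) := Nat.one_le_pow _ _ (by omega)
      simp only [List.length_cons] at hfuel
      nlinarith
  | succ f ih =>
    intro l i t c hiN hgood hInv hfuel
    cases l with
    | nil => exact ⟨c, by simp [runA], hInv⟩
    | cons n rest =>
      have hpow : 1 ≤ (L+2) ^ (i+1) := Nat.one_le_pow _ _ (by omega)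
      have hrestfuel : rest.length * (L+2) ^ (i+1) ≤ f := by
        simp only [List.length_cons] at hfuel
        have : (rest.length + 1) * (L+2)^(i+1) = rest.length * (L+2)^(i+1) + (L+2)^(i+1) := by ring
        omega
      have hgn : goodAt P c0 i n = true := hgood n (List.mem_cons_self)
      have hgrest : ∀ m ∈ rest, goodAt P c0 i m = true := fun m hm => hgood m (List.mem_cons_of_mem _ hm)
      obtain ⟨N', rfl⟩ : ∃ N', N = N' + 1 := by
        have : i ≠ 0 := by intro h; rw [h] at hgn; simp [goodAt] at hgn
        exact ⟨N - 1, by omega⟩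
      by_cases hc : c.contains n = true
      · -- cache hit
        obtain ⟨c', hrun, hInv'⟩ := ih rest i (t + (c.get? n).getD 0) c hiN hgrest hInv hrestfuel
        refine ⟨c', ?_, hInv'⟩
        simp only [runA, hc, if_true]
        rw [hrun, Invb_hit_val P c0 N' (N'+1) c hInv n hc]
        simp [add_assoc]
      · -- not cached: goodAt forces i = i''+1 and a successful lookup
        obtain ⟨i'', rfl⟩ : ∃ i'', i = i'' + 1 := by
          cases i with
          | zero => simp [goodAt] at hgn
          | succ i'' => exact ⟨i'', rfl⟩
        have hc0 : c0.contains n = false := by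
          cases h0 : c0.contains n
          · rfl
          · exact absurd (Invb_trans_contains P c0 (N'+1) (N'+1) c hInv n h0) (by simp [hc])
        simp only [goodAt, hc0, Bool.false_or] at hgn
        cases hP : P.get? n with
        | none => rw [hP] at hgn; simp at hgn
        | some ch =>
          rw [hP] at hgn
          simp only [List.all_eq_true] at hgn
          cases he : ch.isEmpty with
          | true =>
            -- leaf
            have hv1 : valAt P c0 (N'+1) n = 1 := valAt_leaf P c0 N' n ch hc0 hP he
            obtain ⟨c', hrun, hInv'⟩ := ih rest (i''+1) (t + 1) c hiN hgrest hInv hrestfuel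
            refine ⟨c', ?_, hInv'⟩
            simp only [runA, hc, if_false, hP, he, if_true, Bool.false_eq_true]
            rw [hrun]
            simp [List.map_cons, List.sum_cons, hv1, add_assoc]
          | false =>
            -- internal node: recurse on the children, then cache
            have hchfuel : ch.length * (L+2) ^ (i''+1) ≤ f := by
              have h1 : ch.length ≤ L := hL n ch hP
              have hY : 1 ≤ (L+2) ^ (i''+1) := Nat.one_le_pow _ _ (by omega)
              have h2 : ch.length * (L+2)^(i''+1) ≤ L * (L+2)^(i''+1) :=
                Nat.mul_le_mul_right _ h1
              have h3 : (L+2) * (L+2)^(i''+1) ≤ (rest.length + 1) * ((L+2) * (L+2)^(i''+1)) :=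
                Nat.le_mul_of_pos_left _ (by omega)
              have h4 : (rest.length + 1) * ((L+2) * (L+2)^(i''+1)) ≤ f + 1 := by
                simp only [List.length_cons] at hfuel
                calc (rest.length + 1) * ((L+2) * (L+2)^(i''+1))
                    = (rest.length + 1) * (L+2)^(i''+1+1) := by ring
                  _ ≤ f + 1 := hfuel
              have h5 : (L+2) * (L+2)^(i''+1) = L * (L+2)^(i''+1) + 2 * (L+2)^(i''+1) := by ring
              omega
            obtain ⟨c₂, hrunch, hInv₂⟩ := ih ch i'' 0 c (by omega) hgn hInv hchfuel
            -- the inserted value is the reference value of n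
            have hmap : ch.map (valAt P c0 (N'+1)) = ch.map (valAt P c0 N') :=
              List.map_congr_left fun m hm => by
                rw [valAt_stable P c0 i'' (N'+1) m (hgn m hm) (by omega),
                    valAt_stable P c0 i'' N' m (hgn m hm) (by omega)]
            have hsum : (0 : Int) + (ch.map (valAt P c0 (N'+1))).sum = valAt P c0 (N'+1) n := by
              rw [zero_add, valAt_internal P c0 N' n ch hc0 hP he, hmap]
            set s : Int := (0 : Int) + (ch.map (valAt P c0 (N'+1))).sum with hs
            have hgn' : goodAt P c0 (N'+1) n = true := by
              refine goodAt_mono P c0 (i''+1) (N'+1) n ?_ (by omega)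
              simp only [goodAt, hc0, Bool.false_or, hP, List.all_eq_true]
              exact hgn
            have hInv₃ : Invb P c0 (N'+1) (N'+1) (c₂.insert n s) := by
              constructor
              · intro k hk
                have hkn : k ≠ n := fun h => by rw [h] at hk; rw [hk] at hc0; cases hc0
                rw [PySem.Dict.get?_insert]
                simp only [hkn, if_false]
                exact hInv₂.1 k hk
              · intro k hk
                rw [PySem.Dict.get?_insert]
                by_cases hkn : k = n
                · subst hkn
                  exact Or.inr ⟨hgn', by rw [if_pos rfl, hsum]⟩
                · simp only [hkn, if_false]
                  exact hInv₂.2 k hk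
            obtain ⟨c', hrun, hInv'⟩ := ih rest (i''+1) (t + s) (c₂.insert n s) hiN hgrest hInv₃ hrestfuel
            refine ⟨c', ?_, hInv'⟩
            simp only [runA, hc, if_false, hP, he, Bool.false_eq_true]
            rw [hrunch]
            show runA P f rest (t + s) (c₂.insert n s)
                = some (t + ((n :: rest).map (valAt P c0 (N'+1))).sum, c')
            rw [hrun]
            have : t + s + (rest.map (valAt P c0 (N'+1))).sum
                = t + ((n :: rest).map (valAt P c0 (N'+1))).sum := by
              simp only [List.map_cons, List.sum_cons, hsum]
              ring
            rw [this]

-- ===== B-side lemmas =====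

theorem sweepB_flag_true (P : PySem.Dict String (List String)) :
    ∀ l (c : PySem.Dict String Int), (sweepB P l c true).2 = true := by
  intro l
  induction l with
  | nil => intro c; simp [sweepB]
  | cons p rest ih =>
    intro c
    obtain ⟨n, vs⟩ := p
    simp only [sweepB]
    split_ifs <;> exact ih _

theorem sweepB_contains_mono (P : PySem.Dict String (List String)) :
    ∀ l (c : PySem.Dict String Int) b k, c.contains k = true → ((sweepB P l c b).1).contains k = true := by
  intro l
  induction l with
  | nil => intro c b k h; simpa [sweepB] using h
  | cons p rest ih =>
    intro c b k h
    obtain ⟨n, vs⟩ := p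
    simp only [sweepB]
    split_ifs with h1 h2
    · exact ih _ _ _ h
    · refine ih _ _ _ ?_
      rw [PySem.Dict.contains_insert]
      simp [h]
    · exact ih _ _ _ h

theorem sweepB_nochange (P : PySem.Dict String (List String)) :
    ∀ l (c c' : PySem.Dict String Int), sweepB P l c false = (c', false) → c' = c := by
  intro l
  induction l with
  | nil => intro c c' h; simpa [sweepB] using (congrArg Prod.fst h).symm
  | cons p rest ih =>
    intro c c' h
    obtain ⟨n, vs⟩ := p
    simp only [sweepB] at h
    split_ifs at h with h1 h2
    · exact ih _ _ h
    · exfalso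
      have := sweepB_flag_true P rest (c.insert n ((vs.map (fun m => if c.contains m then (c.get? m).getD 0 else 1)).sum))
      rw [h] at this
      simp at this
    · exact ih _ _ h

theorem sweepB_fix (P : PySem.Dict String (List String)) :
    ∀ l (c c' : PySem.Dict String Int), sweepB P l c false = (c', false) →
      ∀ n vs, (n, vs) ∈ l → ¬(c.contains n = false ∧ vs.isEmpty = false ∧ vs.all (resolvedB P c) = true) := by
  intro l
  induction l with
  | nil => intro c c' _ n vs h; simp at h
  | cons q rest ih =>
    intro c c' h n vs hmem hbad
    obtain ⟨hcn, hvs, hall⟩ := hbad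
    rcases List.mem_cons.mp hmem with heq | hmem'
    · subst heq
      simp only [sweepB, hcn, hvs, Bool.or_self, Bool.false_eq_true, if_false, hall, if_true] at h
      have := sweepB_flag_true P rest (c.insert n ((vs.map (fun m => if c.contains m then (c.get? m).getD 0 else 1)).sum))
      rw [h] at this
      simp at this
    · obtain ⟨qn, qvs⟩ := q
      simp only [sweepB] at h
      split_ifs at h with h1 h2
      · exact ih _ _ h n vs hmem' ⟨hcn, hvs, hall⟩
      · have := sweepB_flag_true P rest (c.insert qn ((qvs.map (fun m => if c.contains m then (c.get? m).getD 0 else 1)).sum))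
        rw [h] at this
        simp at this
      · exact ih _ _ h n vs hmem' ⟨hcn, hvs, hall⟩

theorem cntU_mono (P : PySem.Dict String (List String)) :
    ∀ l (c : PySem.Dict String Int) b, cntU P (sweepB P l c b).1 ≤ cntU P c := by
  intro l c b
  refine List.countP_mono_left fun k _ h => ?_
  simp only [Bool.not_eq_true'] at h ⊢
  cases h' : c.contains k
  · rfl
  · exact absurd (sweepB_contains_mono P l c b k h') (by simp [h])

theorem cntU_insert_lt (P : PySem.Dict String (List String)) (c : PySem.Dict String Int)
    (n : String) (v : Int) (hn : n ∈ PySem.Dict.keys P) (hc : c.contains n = false) :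
    cntU P (c.insert n v) < cntU P c := by
  obtain ⟨l1, l2, hsplit⟩ := List.append_of_mem hn
  unfold cntU
  rw [hsplit, List.countP_append, List.countP_append, List.countP_cons, List.countP_cons]
  have h1 : List.countP (fun k => !(c.insert n v).contains k) l1 ≤ List.countP (fun k => !c.contains k) l1 := by
    refine List.countP_mono_left fun k _ h => ?_
    simp only [Bool.not_eq_true', PySem.Dict.contains_insert] at h ⊢
    simp only [Bool.or_eq_false_iff] at h
    exact h.2
  have h2 : List.countP (fun k => !(c.insert n v).contains k) l2 ≤ List.countP (fun k => !c.contains k) l2 := by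
    refine List.countP_mono_left fun k _ h => ?_
    simp only [Bool.not_eq_true', PySem.Dict.contains_insert] at h ⊢
    simp only [Bool.or_eq_false_iff] at h
    exact h.2
  have h3 : (!(c.insert n v).contains n) = false := by
    rw [PySem.Dict.contains_insert]; simp
  have h4 : (!c.contains n) = true := by simp [hc]
  rw [h3, h4]
  simp only [if_true, if_false, Bool.false_eq_true]
  omega

theorem sweepB_changed_cnt (P : PySem.Dict String (List String)) :
    ∀ l (c c' : PySem.Dict String Int),
      (∀ n vs, (n, vs) ∈ l → P.get? n = some vs) →
      sweepB P l c false = (c', true) → cntU P c' < cntU P c := by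
  intro l
  induction l with
  | nil => intro c c' _ h; simp [sweepB] at h
  | cons q rest ih =>
    intro c c' hitems h
    obtain ⟨n, vs⟩ := q
    simp only [sweepB] at h
    split_ifs at h with h1 h2
    · exact ih c c' (fun m ms hm => hitems m ms (List.mem_cons_of_mem _ hm)) h
    · have hn : n ∈ PySem.Dict.keys P := by
        have hg := hitems n vs (List.mem_cons_self)
        rw [← PySem.Dict.contains_iff_mem_keys, PySem.Dict.contains_eq_isSome_get?, hg]
        rfl
      have hc : c.contains n = false := by
        cases h' : c.contains n
        · rfl
        · exfalso; rw [h'] at h1; simp at h1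
      have hlt := cntU_insert_lt P c n ((vs.map (fun m => if c.contains m then (c.get? m).getD 0 else 1)).sum) hn hc
      have hmono := cntU_mono P rest (c.insert n ((vs.map (fun m => if c.contains m then (c.get? m).getD 0 else 1)).sum)) true
      have hc' : c' = (sweepB P rest (c.insert n ((vs.map (fun m => if c.contains m then (c.get? m).getD 0 else 1)).sum)) true).1 := by
        rw [h]
      rw [hc']
      omega
    · exact ih c c' (fun m ms hm => hitems m ms (List.mem_cons_of_mem _ hm)) h

-- a sweep keeps the invariant: every key it caches has all children already resolved,
-- so its closure depth rises by one per insertion while the uncached-key count falls by one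
theorem sweepB_Inv (P : PySem.Dict String (List String)) (c0 : PySem.Dict String Int) (N' : Nat) :
    ∀ l (c : PySem.Dict String Int) (b : Bool) (j : Nat),
      (∀ n vs, (n, vs) ∈ l → P.get? n = some vs) →
      Invb P c0 (N'+1) j c → 1 ≤ j → j + cntU P c ≤ N'+1 →
      ∃ j', Invb P c0 (N'+1) j' (sweepB P l c b).1 ∧ 1 ≤ j' ∧
        j' + cntU P (sweepB P l c b).1 ≤ j + cntU P c := by
  intro l
  induction l with
  | nil =>
    intro c b j _ hInv hj _
    exact ⟨j, by simpa [sweepB] using hInv, hj, by simp [sweepB]⟩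
  | cons q rest ih =>
    intro c b j hitems hInv hj hjc
    obtain ⟨n, vs⟩ := q
    have hrest : ∀ m ms, (m, ms) ∈ rest → P.get? m = some ms :=
      fun m ms hm => hitems m ms (List.mem_cons_of_mem _ hm)
    simp only [sweepB]
    split_ifs with h1 h2
    · exact ih c b j hrest hInv hj hjc
    · -- insert n
      have hPn : P.get? n = some vs := hitems n vs (List.mem_cons_self)
      have hcn : c.contains n = false := by
        cases h' : c.contains n
        · rfl
        · exfalso; rw [h'] at h1; simp at h1
      have hvse : vs.isEmpty = false := by
        cases h' : vs.isEmpty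
        · rfl
        · exfalso; rw [h'] at h1; simp at h1
      have hc0n : c0.contains n = false := by
        cases h' : c0.contains n
        · rfl
        · exact absurd (Invb_trans_contains P c0 (N'+1) j c hInv n h') (by simp [hcn])
      have hn : n ∈ PySem.Dict.keys P := by
        rw [← PySem.Dict.contains_iff_mem_keys, PySem.Dict.contains_eq_isSome_get?, hPn]; rfl
      have hcntpos : 1 ≤ cntU P c := by
        have := cntU_insert_lt P c n 0 hn hcn
        omega
      obtain ⟨N'', rfl⟩ : ∃ N'', N' = N'' + 1 := ⟨N' - 1, by omega⟩
      -- every child is good at depth j and contributes its reference value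
      have hchild : ∀ m ∈ vs, goodAt P c0 j m = true ∧
          (if c.contains m then (c.get? m).getD 0 else 1) = valAt P c0 (N''+1) m := by
        intro m hm
        have hr : resolvedB P c m = true := List.all_eq_true.mp h2 m hm
        obtain ⟨j0, rfl⟩ : ∃ j0, j = j0 + 1 := ⟨j - 1, by omega⟩
        by_cases hcm : c.contains m = true
        · constructor
          · by_cases hm0 : c0.contains m = true
            · simp [goodAt, hm0]
            · simp only [Bool.not_eq_true] at hm0
              rcases hInv.2 m hm0 with h0 | ⟨hg, _⟩
              · rw [PySem.Dict.contains_eq_isSome_get?, h0] at hcm; simp at hcm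
              · exact hg
          · simp only [hcm, if_true]
            rw [Invb_hit_val P c0 (N''+1) (j0+1) c hInv m hcm]
            by_cases hm0 : c0.contains m = true
            · have hg1 : goodAt P c0 1 m = true := by simp [goodAt, hm0]
              rw [valAt_stable P c0 1 (N''+1+1) m hg1 (by omega), valAt_stable P c0 1 (N''+1) m hg1 (by omega)]
            · simp only [Bool.not_eq_true] at hm0
              rcases hInv.2 m hm0 with h0 | ⟨hg, _⟩
              · rw [PySem.Dict.contains_eq_isSome_get?, h0] at hcm; simp at hcm
              · rw [valAt_stable P c0 (j0+1) (N''+1+1) m hg (by omega),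
                    valAt_stable P c0 (j0+1) (N''+1) m hg (by omega)]
        · -- uncached: resolvedB forces a leaf key
          simp only [Bool.not_eq_true] at hcm
          have hPm : P.get? m = some [] := by
            rcases Bool.or_eq_true_iff.mp hr with h' | h'
            · rw [hcm] at h'; cases h'
            · exact (beq_iff_eq).mp h'
          have hm0 : c0.contains m = false := by
            cases h' : c0.contains m
            · rfl
            · exact absurd (Invb_trans_contains P c0 (N''+1+1) (j0+1) c hInv m h') (by simp [hcm])
          constructor
          · simp [goodAt, hm0, hPm]
          · rw [if_neg (by simp [hcm])]
            obtain ⟨N3, hN3⟩ : ∃ N3, N''+1 = N3 + 1 := ⟨N'', rfl⟩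
            rw [hN3, valAt_leaf P c0 N3 m [] hm0 hPm rfl]
      set s : Int := (vs.map (fun m => if c.contains m then (c.get? m).getD 0 else 1)).sum with hs
      have hvaln : valAt P c0 (N''+1+1) n = s := by
        rw [valAt_internal P c0 (N''+1) n vs hc0n hPn hvse, hs]
        exact congrArg List.sum (List.map_congr_left fun m hm => ((hchild m hm).2).symm)
      have hgn : goodAt P c0 (j+1) n = true := by
        simp only [goodAt, hc0n, Bool.false_or, hPn, List.all_eq_true]
        exact fun m hm => (hchild m hm).1
      have hInv' : Invb P c0 (N''+1+1) (j+1) (c.insert n s) := by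
        have hInvm := Invb_mono P c0 (N''+1+1) j (j+1) c hInv (by omega)
        constructor
        · intro k hk
          have hkn : k ≠ n := fun h => by rw [h] at hk; rw [hk] at hc0n; cases hc0n
          rw [PySem.Dict.get?_insert]
          simp only [hkn, if_false]
          exact hInvm.1 k hk
        · intro k hk
          rw [PySem.Dict.get?_insert]
          by_cases hkn : k = n
          · subst hkn
            exact Or.inr ⟨hgn, by rw [if_pos rfl, hvaln]⟩
          · simp only [hkn, if_false]
            exact hInvm.2 k hk
      have hcnt' := cntU_insert_lt P c n s hn hcn
      obtain ⟨j', hInv'', hj', hle⟩ :=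
        ih (c.insert n s) true (j+1) hrest hInv' (by omega) (by omega)
      exact ⟨j', hInv'', hj', by omega⟩
    · exact ih c b j hrest hInv hj hjc

theorem runB_ok (P : PySem.Dict String (List String)) (c0 : PySem.Dict String Int) (N' : Nat)
    (hitems : ∀ n vs, (n, vs) ∈ P.items → P.get? n = some vs) :
    ∀ f (j : Nat) (c : PySem.Dict String Int),
      Invb P c0 (N'+1) j c → 1 ≤ j → j + cntU P c ≤ N'+1 → cntU P c + 1 ≤ f →
      ∃ cS, runB P f c = some cS ∧ Invb P c0 (N'+1) (N'+1) cS ∧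
        (∀ n vs, (n, vs) ∈ P.items → ¬(cS.contains n = false ∧ vs.isEmpty = false ∧ vs.all (resolvedB P cS) = true)) := by
  intro f
  induction f with
  | zero => intro j c _ _ _ hf; omega
  | succ f ih =>
    intro j c hInv hj hjc hf
    rcases hsw : sweepB P P.items c false with ⟨c', b⟩
    cases b with
    | false =>
      have hc' : c' = c := sweepB_nochange P P.items c c' hsw
      subst hc'
      refine ⟨c', ?_, Invb_mono P c0 (N'+1) j (N'+1) c' hInv (by omega), ?_⟩
      · simp only [runB, hsw]
      · exact fun n vs hm => sweepB_fix P P.items c' c' hsw n vs hm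
    | true =>
      obtain ⟨j', hInv', hj', hle⟩ := sweepB_Inv P c0 N' P.items c false j hitems hInv hj hjc
      rw [hsw] at hInv' hle
      simp only at hInv' hle
      have hlt : cntU P c' < cntU P c := sweepB_changed_cnt P P.items c c' hitems hsw
      obtain ⟨cS, hrun, hInvS, hfix⟩ := ih j' c' hInv' hj' (by omega) (by omega)
      exact ⟨cS, by simp only [runB, hsw]; exact hrun, hInvS, hfix⟩

-- under the fixpoint, every good node is cached or an uncached leaf key
theorem fix_resolved (P : PySem.Dict String (List String)) (c0 : PySem.Dict String Int)
    (hnd : (PySem.Dict.keys P).Nodup) (cS : PySem.Dict String Int)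
    (htr : ∀ k, c0.contains k = true → cS.contains k = true)
    (hfix : ∀ n vs, (n, vs) ∈ P.items → ¬(cS.contains n = false ∧ vs.isEmpty = false ∧ vs.all (resolvedB P cS) = true)) :
    ∀ i n, goodAt P c0 i n = true → cS.contains n = true ∨ P.get? n = some [] := by
  intro i
  induction i with
  | zero => intro n h; simp [goodAt] at h
  | succ i ih =>
    intro n h
    simp only [goodAt] at h
    rcases Bool.or_eq_true_iff.mp h with hc | hm
    · exact Or.inl (htr n hc)
    · cases hP : P.get? n with
      | none => rw [hP] at hm; simp at hm
      | some ch =>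
        rw [hP] at hm
        simp only [List.all_eq_true] at hm
        cases hch : ch.isEmpty with
        | true =>
          right
          have hche : ch = [] := by simpa using hch
          rw [hche]
        | false =>
          left
          have hmem : (n, ch) ∈ P.items :=
            (PySem.Dict.get?_eq_some_iff_mem_items P n ch hnd).mp hP
          by_contra hcn
          simp only [Bool.not_eq_true] at hcn
          refine hfix n ch hmem ⟨hcn, hch, ?_⟩
          simp only [List.all_eq_true]
          intro m hmm
          rcases ih m (hm m hmm) with h' | h'
          · simp [resolvedB, h']
          · simp [resolvedB, h']

-- ===== VERDICT (by name: the statement is the Claim_ definition above) =====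
theorem solve_spec : Claim_equal_solve := by
  intro paths current_node cache _ hpre
  unfold Spec_solve
  unfold Pre_solve at hpre
  set P : PySem.Dict String (List String) := PySem.Dict.ofList paths with hPdef
  set c0 : PySem.Dict String Int := PySem.Dict.ofList (cache.getD []) with hc0def
  set N' : Nat := P.size + 2 with hN'def
  have hNeq : P.size + 3 = N' + 1 := by omega
  rw [hNeq] at hpre
  have hnd : (PySem.Dict.keys P).Nodup := PySem.Dict.nodup_keys_ofList paths
  -- base invariant holds for the initial cache
  have hInv0 : ∀ j, Invb P c0 (N'+1) j c0 := by
    intro j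
    refine ⟨fun k _ => rfl, fun k hk => Or.inl ?_⟩
    exact (PySem.Dict.get?_eq_none_iff_contains c0 k).mpr hk
  -- A's side: the recursion computes valAt (N'+1) current_node
  have hL : ∀ n ch, P.get? n = some ch → ch.length ≤ sumLenA P.items := by
    intro n ch h
    exact sumLenA_bound P.items (n, ch) ((PySem.Dict.get?_eq_some_iff_mem_items P n ch hnd).mp h)
  obtain ⟨cA, hrunA, _⟩ :=
    runA_ok P c0 (N'+1) (sumLenA P.items) hL ((sumLenA P.items + 2) ^ (P.size + 4))
      [current_node] (N'+1) 0 c0 (le_refl _)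
      (by intro n hn; rcases List.mem_singleton.mp hn with rfl; exact hpre)
      (hInv0 (N'+1))
      (by simp only [List.length_singleton, one_mul]
          have : P.size + 4 = N' + 1 + 1 := by omega
          rw [this])
  have hA : solve paths current_node cache = valAt P c0 (N'+1) current_node := by
    have hbody : solve paths current_node cache
        = match runA P ((sumLenA P.items + 2) ^ (P.size + 4)) [current_node] 0 c0 with
          | some (t, _) => t
          | none => 0 := rfl
    rw [hbody, hrunA]
    show (0 : Int) + (List.map (valAt P c0 (N'+1)) [current_node]).sum = valAt P c0 (N'+1) current_node
    simp
  -- B's side: the fixed-point sweep resolves every good node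
  have hitems : ∀ n vs, (n, vs) ∈ P.items → P.get? n = some vs := by
    intro n vs hm
    exact (PySem.Dict.get?_eq_some_iff_mem_items P n vs hnd).mpr hm
  obtain ⟨cS, hrunB, hInvS, hfix⟩ :=
    runB_ok P c0 N' hitems (P.size + 2) 1 c0 (hInv0 1) (le_refl _)
      (by have h1 : cntU P c0 ≤ (PySem.Dict.keys P).length := List.countP_le_length
          have h2 : (PySem.Dict.keys P).length = P.size := by
            simp [PySem.Dict.keys, PySem.Dict.size, List.length_map]
          omega)
      (by have h1 : cntU P c0 ≤ (PySem.Dict.keys P).length := List.countP_le_length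
          have h2 : (PySem.Dict.keys P).length = P.size := by
            simp [PySem.Dict.keys, PySem.Dict.size, List.length_map]
          omega)
  have htr : ∀ k, c0.contains k = true → cS.contains k = true :=
    fun k hk => Invb_trans_contains P c0 (N'+1) (N'+1) cS hInvS k hk
  have hres := fix_resolved P c0 hnd cS htr hfix (N'+1) current_node hpre
  have hB : solve_alt paths current_node cache = valAt P c0 (N'+1) current_node := by
    have hbody : solve_alt paths current_node cache
        = match runB P (P.size + 2) c0 with
          | none => 0
          | some c =>
            if c.contains current_node then (c.get? current_node).getD 0
            else match P.get? current_node with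
              | some [] => 1
              | _ => 0 := rfl
    rw [hbody, hrunB]
    show (if cS.contains current_node = true then (cS.get? current_node).getD 0
          else match P.get? current_node with
            | some [] => 1
            | _ => 0) = valAt P c0 (N'+1) current_node
    rcases hres with hcS | hleaf
    · rw [if_pos hcS]
      exact Invb_hit_val P c0 N' (N'+1) cS hInvS current_node hcS
    · by_cases hcS : cS.contains current_node = true
      · rw [if_pos hcS]
        exact Invb_hit_val P c0 N' (N'+1) cS hInvS current_node hcS
      · simp only [Bool.not_eq_true] at hcS
        rw [if_neg (by simp [hcS])]
        rw [hleaf]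
        have hc0cur : c0.contains current_node = false := by
          cases h' : c0.contains current_node
          · rfl
          · exact absurd (htr current_node h') (by simp [hcS])
        exact (valAt_leaf P c0 N' current_node [] hc0cur hleaf rfl).symm
  rw [hA, hB]
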